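-- pv_equiv track=rewrite | github.com/mrwalter20/CSCE-4523-Database | Homework1/Homework1.py | readFieldData
-- ===== SOURCE A (Python) =====
-- def readFieldData(record):
-- 	name = ''
-- 	size = ''
-- 	field_name = ''
-- 	field_size = ''
-- 	for char in record:
-- 		if (char == ' '):
-- 			field_name = name
-- 		elif (char == '\n'):
-- 			field_size = size
-- 		elif (char != ' ') and (not char.isnumeric()):
-- 			name+=char
-- 		elif (char != ' ') and (char.isnumeric()):
-- 			size+=char
-- 	return field_name, int(field_size)
-- ===== SOURCE B (Python) =====
-- def readFieldData(record):
--     head, _, _ = record.rpartition(' ')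
--     field_name = ''.join(c for c in head if c != ' ' and c != '\n' and not c.isnumeric())
--     nhead, _, _ = record.rpartition('\n')
--     field_size = ''.join(c for c in nhead if c.isnumeric())
--     return field_name, int(field_size)
-- ===== Notes on version B (the rewrite author's own statement) =====
-- stated objective: simpler
-- what changed: Replaces A's single stateful pass with four running buffers and snapshot-at-separator logic by locating the last space/newline via rpartition and filtering the prefix before each, in two direct passes.
-- outside the precondition, e.g. on readFieldData(''): A raises ValueError, B raises ValueError
import Mathlib
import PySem

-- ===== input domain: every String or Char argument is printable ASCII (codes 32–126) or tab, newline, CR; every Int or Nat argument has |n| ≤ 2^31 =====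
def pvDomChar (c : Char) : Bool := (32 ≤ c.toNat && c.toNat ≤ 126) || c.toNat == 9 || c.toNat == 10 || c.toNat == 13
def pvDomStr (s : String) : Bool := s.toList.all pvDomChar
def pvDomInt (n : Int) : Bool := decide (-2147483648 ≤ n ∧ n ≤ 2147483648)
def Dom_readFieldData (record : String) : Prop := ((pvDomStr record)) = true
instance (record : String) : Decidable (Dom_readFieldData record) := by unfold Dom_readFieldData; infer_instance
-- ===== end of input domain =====

-- B replaces A's single stateful pass (running buffers snapshotted at each separator) by locating the
-- last separator with rpartition and filtering the prefix before it — objective: simpler decomposition.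
-- On Dom (ASCII + tab/newline/CR) Python's str.isnumeric is exactly Char.isDigit.

-- ===== PORT A =====
-- state = (name, size, field_name, field_size), exactly A's four accumulators
def pvStepA (s : List Char × List Char × List Char × List Char) (c : Char) :
    List Char × List Char × List Char × List Char :=
  if c = ' ' then (s.1, s.2.1, s.1, s.2.2.2)
  else if c = '\n' then (s.1, s.2.1, s.2.2.1, s.2.1)
  else if c ≠ ' ' ∧ ¬ c.isDigit then (s.1 ++ [c], s.2.1, s.2.2.1, s.2.2.2)
  else if c ≠ ' ' ∧ c.isDigit then (s.1, s.2.1 ++ [c], s.2.2.1, s.2.2.2)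
  else s

def readFieldData (record : String) : String × Int :=
  let r := record.toList.foldl pvStepA ([], [], [], [])
  -- int(field_size): ValueError (field_size = '') is excluded by Pre_; .getD 0 is never reached there
  (String.ofList r.2.2.1, (PySem.Int.ofChars? r.2.2.2).getD 0)

-- ===== PORT B =====
-- head of record.rpartition(sep): chars before the LAST sep, or [] when sep does not occur (exact)
def pvRpartHead (l : List Char) (sep : Char) : List Char :=
  match l.reverse.dropWhile (fun c => c != sep) with
  | [] => []
  | _ :: before => before.reverse

def readFieldData_alt (record : String) : String × Int :=
  let fieldName := (pvRpartHead record.toList ' ').filter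
      (fun c => c != ' ' && c != '\n' && !c.isDigit)
  let fieldSize := (pvRpartHead record.toList '\n').filter (fun c => c.isDigit)
  (String.ofList fieldName, (PySem.Int.ofChars? fieldSize).getD 0)

-- ===== PRECONDITION & SPEC =====
-- Pre_-local copy of "chars before the last newline" (Pre_ may not reach the ports)
def pvSizeSrc (l : List Char) : List Char :=
  match l.reverse.dropWhile (fun c => c != '\n') with
  | [] => []
  | _ :: before => before.reverse

-- Pre_ excludes exactly the inputs where A's int('') raises ValueError:
-- records with no digit before the last newline (in particular records with no newline).
def Pre_readFieldData (record : String) : Prop :=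
  ((pvSizeSrc record.toList).any (fun c => c.isDigit)) = true
instance (record : String) : Decidable (Pre_readFieldData record) := by
  unfold Pre_readFieldData; infer_instance

def pvWitness_readFieldData : String := "abc 37\n"

def Spec_readFieldData (record : String) (out : String × Int) : Prop := out = readFieldData_alt record
instance (record : String) (out : String × Int) : Decidable (Spec_readFieldData record out) := by
  unfold Spec_readFieldData; infer_instance

-- ===== CLAIM (what is proved, stated in full; the proofs are below) =====
def Claim_equal_readFieldData : Prop := ∀ (record : String), Dom_readFieldData record → Pre_readFieldData record → Spec_readFieldData record (readFieldData record)

-- ===== LEMMAS AND PROOFS =====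

-- name / size buffers as filters
def pvN (l : List Char) : List Char := l.filter (fun c => c != ' ' && c != '\n' && !c.isDigit)
def pvS (l : List Char) : List Char := l.filter (fun c => c.isDigit)

-- snapshot at the last sep, reading the REVERSED input
def pvSnap (p : Char → Bool) (sep : Char) : List Char → List Char
  | [] => []
  | c :: r => if c = sep then r.reverse.filter p else pvSnap p sep r

lemma pvStepA_inv (l : List Char) :
    l.foldl pvStepA ([], [], [], []) =
      (pvN l, pvS l,
       pvSnap (fun c => c != ' ' && c != '\n' && !c.isDigit) ' ' l.reverse,
       pvSnap (fun c => c.isDigit) '\n' l.reverse) := by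
  induction l using List.reverseRecOn with
  | nil => rfl
  | append_singleton l c ih =>
    simp only [List.foldl_append, List.foldl_cons, List.foldl_nil, ih, pvStepA,
      List.reverse_append, List.reverse_cons, List.reverse_nil, List.nil_append,
      List.cons_append, pvSnap, pvN, pvS, List.filter_append, List.filter_cons,
      List.filter_nil, List.reverse_reverse]
    split_ifs with h1 h2 h3 h4 <;>
      simp_all [pvN, pvS]

lemma pvSnap_eq_rpartHead (p : Char → Bool) (sep : Char) (l : List Char) :
    pvSnap p sep l.reverse = (pvRpartHead l sep).filter p := by
  rw [pvRpartHead]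
  generalize l.reverse = r
  induction r with
  | nil => rfl
  | cons c r ih =>
    by_cases h : c = sep
    · simp [pvSnap, h]
    · simp [pvSnap, h, ih]

-- ===== VERDICT (by name: the statement is the Claim_ definition above) =====
theorem readFieldData_spec : Claim_equal_readFieldData := by
  intro record _ _
  show _ = _
  rw [readFieldData, readFieldData_alt, pvStepA_inv, pvSnap_eq_rpartHead, pvSnap_eq_rpartHead]
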